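-- pv_equiv track=rewrite | github.com/hlastras/competitive_programming | Tuenti/2020/challenge15.py | crc32_combine
-- ===== SOURCE A (Python) =====
-- def gf2_matrix_square(square, mat):
--   for n in range(0, 32):
--     if (len(square) < (n + 1)):
--       square.append(gf2_matrix_times(mat, mat[n]))
--     else:
--       square[n] = gf2_matrix_times(mat, mat[n])
--   return square
--
-- def gf2_matrix_times(mat, vec):
--   sum = 0
--   i = 0
--   while vec:
--     if (vec & 1):
--       sum = sum ^ mat[i]
--     vec = (vec >> 1) & 0x7FFFFFFF
--     i = i + 1
--   return sum
--
-- def crc32_combine(crc1, crc2, len2):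
--   even = []
--   odd = []
--   if (len2 == 0):
--     return crc1
--
--   odd.append(0xEDB88320)
--   row = 1
--
--   for n in range(1, 32):
--     odd.append(row)
--     row = row << 1
--
--   even = gf2_matrix_square(even, odd)
--   odd = gf2_matrix_square(odd, even)
--
--   while (len2 != 0):
--     even = gf2_matrix_square(even, odd)
--     if (len2 & 1):
--       crc1 = gf2_matrix_times(even, crc1)
--     len2 = len2 >> 1
--
--     if (len2 == 0):
--       break
--
--     odd = gf2_matrix_square(odd, even)
--     if (len2 & 1):
--       crc1 = gf2_matrix_times(odd, crc1)
--     len2 = len2 >> 1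
--
--   crc1 = crc1 ^ crc2
--   return crc1
-- ===== SOURCE B (Python) =====
-- def gf2_matrix_times(mat, vec):
--   sum = 0
--   i = 0
--   while vec:
--     if (vec & 1):
--       sum = sum ^ mat[i]
--     vec = (vec >> 1) & 0x7FFFFFFF
--     i = i + 1
--   return sum
--
-- def gf2_matrix_mul(a, b):
--   # GF(2) matrix product a*b, columns of b mapped through a
--   return [gf2_matrix_times(a, col) for col in b]
--
-- def crc32_combine(crc1, crc2, len2):
--   if len2 == 0:
--     return crc1
--   # base operator: one zero BIT appended to the CRC register
--   base = [0xEDB88320] + [1 << n for n in range(31)]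
--   result = [1 << n for n in range(32)]  # identity matrix
--   e = 8 * len2                          # len2 zero BYTES = 8*len2 bits
--   while e:
--     if e & 1:
--       result = gf2_matrix_mul(base, result)
--     base = gf2_matrix_mul(base, base)
--     e >>= 1
--   return gf2_matrix_times(result, crc1) ^ crc2
-- ===== Notes on version B (the rewrite author's own statement) =====
-- stated objective: alternative
-- what changed: Replaces A's interleaved even/odd pair-of-buffers squaring loop by standard binary exponentiation of the single bit-shift operator matrix with an explicit identity accumulator and exponent 8*len2, applied once to crc1.
import Mathlib
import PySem

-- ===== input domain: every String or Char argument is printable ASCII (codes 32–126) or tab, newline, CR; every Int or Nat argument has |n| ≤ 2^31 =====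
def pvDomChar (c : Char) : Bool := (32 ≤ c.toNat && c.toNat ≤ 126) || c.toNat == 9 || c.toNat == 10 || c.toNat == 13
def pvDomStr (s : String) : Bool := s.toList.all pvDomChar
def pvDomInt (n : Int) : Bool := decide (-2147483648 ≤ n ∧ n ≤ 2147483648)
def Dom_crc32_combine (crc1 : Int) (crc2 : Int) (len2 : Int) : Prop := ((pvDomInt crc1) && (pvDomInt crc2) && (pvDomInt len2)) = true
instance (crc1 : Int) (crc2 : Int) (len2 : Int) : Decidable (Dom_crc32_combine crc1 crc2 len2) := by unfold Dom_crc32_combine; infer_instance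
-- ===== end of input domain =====

-- B replaces A's interleaved even/odd squaring loop by plain binary exponentiation of the
-- one-bit-shift operator matrix with an identity accumulator and exponent 8*len2 (objective: alternative).

-- ===== PORT A =====
-- while vec: loop of gf2_matrix_times; fuel 64 only makes it total (on the admitted
-- inputs vec < 2^32 and the loop body runs at most 33 times).
def gf2MatrixTimesAux : Nat → List Int → Int → Nat → Int → Int
  | 0, _, sum, _, _ => sum
  | fuel+1, mat, sum, i, vec =>
    if vec = 0 then sum
    else
      gf2MatrixTimesAux fuel mat
        (if PySem.Int.band vec 1 ≠ 0 then PySem.Int.bxor sum (mat.getD i 0) else sum)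
        (i + 1)
        (PySem.Int.band (vec >>> (1 : Nat)) 0x7FFFFFFF)

-- mat[i] ported as mat.getD i 0: on the admitted inputs i never leaves the 32 rows (vec < 2^32)
def gf2_matrix_times (mat : List Int) (vec : Int) : Int := gf2MatrixTimesAux 64 mat 0 0 vec

def gf2_matrix_square (square : List Int) (mat : List Int) : List Int :=
  (List.range 32).foldl
    (fun sq n =>
      if sq.length < n + 1 then sq ++ [gf2_matrix_times mat (mat.getD n 0)]
      else sq.set n (gf2_matrix_times mat (mat.getD n 0)))
    square

-- the while (len2 != 0) loop of A; fuel 64 only makes it total (len2 < 2^32 on the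
-- admitted inputs, two bits are consumed per round)
def crc32CombineLoop : Nat → List Int → List Int → Int → Int → Int
  | 0, _, _, crc1, _ => crc1
  | fuel+1, even, odd, crc1, len2 =>
    if len2 = 0 then crc1
    else
      let even' := gf2_matrix_square even odd
      let crc1' := if PySem.Int.band len2 1 ≠ 0 then gf2_matrix_times even' crc1 else crc1
      let len2' := len2 >>> (1 : Nat)
      if len2' = 0 then crc1'
      else
        let odd' := gf2_matrix_square odd even'
        let crc1'' := if PySem.Int.band len2' 1 ≠ 0 then gf2_matrix_times odd' crc1' else crc1'
        crc32CombineLoop fuel even' odd' crc1'' (len2' >>> (1 : Nat))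

def crc32_combine (crc1 : Int) (crc2 : Int) (len2 : Int) : Int :=
  if len2 = 0 then crc1
  else
    let st := (PySem.List.pyRange 1 32).foldl
      (fun (st : List Int × Int) _n => (st.1 ++ [st.2], st.2 <<< (1 : Nat))) ([0xEDB88320], 1)
    let odd := st.1
    let even := gf2_matrix_square [] odd
    let odd2 := gf2_matrix_square odd even
    PySem.Int.bxor (crc32CombineLoop 64 even odd2 crc1 len2) crc2

-- ===== PORT B =====
def gf2_matrix_mul (a : List Int) (b : List Int) : List Int :=
  b.map (fun col => gf2_matrix_times a col)

-- the while e: loop of B; fuel 64 only makes it total (e = 8*len2 < 2^35 on the admitted inputs)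
def crc32BinExpLoop : Nat → List Int → List Int → Int → List Int
  | 0, result, _, _ => result
  | fuel+1, result, base, e =>
    if e = 0 then result
    else
      let result' := if PySem.Int.band e 1 ≠ 0 then gf2_matrix_mul base result else result
      crc32BinExpLoop fuel result' (gf2_matrix_mul base base) (e >>> (1 : Nat))

def crc32_combine_alt (crc1 : Int) (crc2 : Int) (len2 : Int) : Int :=
  if len2 = 0 then crc1
  else
    let base := (0xEDB88320 : Int) :: (List.range 31).map (fun n : Nat => (1 : Int) <<< n)
    let result := (List.range 32).map (fun n : Nat => (1 : Int) <<< n)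
    let r := crc32BinExpLoop 64 result base (8 * len2)
    PySem.Int.bxor (gf2_matrix_times r crc1) crc2

-- ===== PRECONDITION & SPEC =====
-- For len2 < 0 A's `while (len2 != 0): ... len2 = len2 >> 1` never terminates
-- (a negative int shifted right stays -1 forever), so A never returns there.
def Pre_crc32_combine (crc1 : Int) (crc2 : Int) (len2 : Int) : Prop := 0 ≤ len2
instance (crc1 : Int) (crc2 : Int) (len2 : Int) : Decidable (Pre_crc32_combine crc1 crc2 len2) := by
  unfold Pre_crc32_combine; infer_instance

def pvWitness_crc32_combine : Int × Int × Int := (123456789, 987654321, 11)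

def Spec_crc32_combine (crc1 : Int) (crc2 : Int) (len2 : Int) (out : Int) : Prop := out = crc32_combine_alt crc1 crc2 len2
instance (crc1 : Int) (crc2 : Int) (len2 : Int) (out : Int) : Decidable (Spec_crc32_combine crc1 crc2 len2 out) := by unfold Spec_crc32_combine; infer_instance

-- ===== CLAIM (what is proved, stated in full; the proofs are below) =====
def Claim_equal_crc32_combine : Prop := ∀ (crc1 : Int) (crc2 : Int) (len2 : Int), Dom_crc32_combine crc1 crc2 len2 → Pre_crc32_combine crc1 crc2 len2 → Spec_crc32_combine crc1 crc2 len2 (crc32_combine crc1 crc2 len2)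

-- ===== LEMMAS AND PROOFS =====

-- The GF(2)-linear model: a matrix is its list of columns (32-bit Nats); applying it to a
-- vector XORs the columns at the set bits of the vector.
def appRest (M : List Nat) (i : Nat) (w : Nat) : Nat :=
  if h : w = 0 then 0
  else (if w % 2 = 1 then M.getD i 0 else 0) ^^^ appRest M (i+1) (w/2)
termination_by w
decreasing_by omega

def appN (M : List Nat) (w : Nat) : Nat := appRest M 0 w

def B0N : List Nat := 0xEDB88320 :: (List.range 31).map (fun n => 1 <<< n)
def fB0 (w : Nat) : Nat := appN B0N w
def SQN (M : List Nat) : List Nat := (List.range 32).map (fun n => appN M (M.getD n 0))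
def MULN (M N : List Nat) : List Nat := N.map (appN M)
def IDN : List Nat := (List.range 32).map (fun n => 1 <<< n)
def GoodM (M : List Nat) : Prop := M.length = 32 ∧ ∀ x ∈ M, x < 4294967296
def RepM (M : List Nat) (k : Nat) : Prop := ∀ w, w < 4294967296 → appN M w = fB0^[k] w

theorem appRest_zero (M : List Nat) (i : Nat) : appRest M i 0 = 0 := by
  unfold appRest; simp

theorem appRest_eq (M : List Nat) (i w : Nat) :
    appRest M i w = (if w % 2 = 1 then M.getD i 0 else 0) ^^^ appRest M (i+1) (w/2) := by
  by_cases h : w = 0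
  · subst h; simp [appRest_zero]
  · conv_lhs => rw [appRest]
    simp [h]

theorem getD_lt (M : List Nat) (hM : ∀ x ∈ M, x < 4294967296) (i : Nat) :
    M.getD i 0 < 4294967296 := by
  by_cases h : i < M.length
  · rw [List.getD_eq_getElem M 0 h]
    exact hM _ (List.getElem_mem h)
  · rw [List.getD_eq_default _ _ (by omega)]
    norm_num

theorem appRest_lt (M : List Nat) (hM : ∀ x ∈ M, x < 4294967296) (i w : Nat) :
    appRest M i w < 4294967296 := by
  induction w using Nat.strong_induction_on generalizing i with
  | _ w ih =>
    rw [appRest_eq]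
    have h32 : (4294967296 : Nat) = 2 ^ 32 := by norm_num
    by_cases h : w = 0
    · subst h; simp [appRest_zero]
    · have h1 : (if w % 2 = 1 then M.getD i 0 else 0) < 4294967296 := by
        split
        · exact getD_lt M hM i
        · norm_num
      have h2 : appRest M (i+1) (w/2) < 4294967296 := ih (w/2) (by omega) (i+1)
      rw [h32] at h1 h2 ⊢
      exact Nat.xor_lt_two_pow h1 h2

theorem appRest_xor (M : List Nat) :
    ∀ (k a : Nat), a < 2 ^ k → ∀ b i, appRest M i (a ^^^ b) = appRest M i a ^^^ appRest M i b := by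
  intro k
  induction k with
  | zero =>
    intro a ha b i
    have : a = 0 := by omega
    subst this
    simp [appRest_zero]
  | succ k ih =>
    intro a ha b i
    rw [appRest_eq M i (a ^^^ b), appRest_eq M i a, appRest_eq M i b]
    have hdiv : (a ^^^ b) / 2 = a / 2 ^^^ b / 2 := by
      rw [← Nat.shiftRight_one, ← Nat.shiftRight_one, ← Nat.shiftRight_one]
      exact Nat.shiftRight_xor_distrib
    have hmod : (a ^^^ b) % 2 = (a % 2) ^^^ (b % 2) := by
      rw [← Nat.and_one_is_mod, ← Nat.and_one_is_mod, ← Nat.and_one_is_mod]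
      exact Nat.and_xor_distrib_right
    have hrec := ih (a / 2) (by omega) (b / 2) (i + 1)
    rw [hdiv, hrec, hmod]
    rcases Nat.mod_two_eq_zero_or_one a with h1 | h1 <;>
      rcases Nat.mod_two_eq_zero_or_one b with h2 | h2 <;>
      simp [h1, h2, Nat.xor_assoc, Nat.xor_comm, Nat.xor_left_comm]

theorem appN_zero (M : List Nat) : appN M 0 = 0 := appRest_zero M 0

theorem appN_xor (M : List Nat) (a b : Nat) : appN M (a ^^^ b) = appN M a ^^^ appN M b :=
  appRest_xor M a a (Nat.lt_two_pow_self) b 0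

theorem appRest_comp (M N P : List Nat) (h : ∀ i, P.getD i 0 = appN M (N.getD i 0)) :
    ∀ (w i : Nat), appRest P i w = appN M (appRest N i w) := by
  intro w
  induction w using Nat.strong_induction_on with
  | _ w ih =>
    intro i
    rw [appRest_eq P i w, appRest_eq N i w]
    by_cases h0 : w = 0
    · subst h0; simp [appRest_zero, appN_zero]
    · rw [appN_xor]
      congr 1
      · split
        · exact h i
        · simp [appN_zero]
      · exact ih (w/2) (by omega) (i+1)

theorem MULN_getD (M N : List Nat) (i : Nat) : (MULN M N).getD i 0 = appN M (N.getD i 0) := by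
  by_cases h : i < N.length
  · simp [MULN, List.getD_eq_getElem?_getD, h]
  · rw [List.getD_eq_default _ _ (by simp [MULN]; omega), List.getD_eq_default _ _ (by omega)]
    simp [appN_zero]

theorem SQN_getD (M : List Nat) (hlen : M.length = 32) (i : Nat) :
    (SQN M).getD i 0 = appN M (M.getD i 0) := by
  by_cases h : i < 32
  · simp [SQN, List.getD_eq_getElem?_getD, h]
  · rw [List.getD_eq_default _ _ (by simp [SQN]; omega), List.getD_eq_default _ _ (by omega)]
    simp [appN_zero]

theorem appN_MULN (M N : List Nat) (w : Nat) : appN (MULN M N) w = appN M (appN N w) :=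
  appRest_comp M N (MULN M N) (MULN_getD M N) w 0

theorem appN_SQN (M : List Nat) (hlen : M.length = 32) (w : Nat) :
    appN (SQN M) w = appN M (appN M w) :=
  appRest_comp M M (SQN M) (SQN_getD M hlen) w 0

theorem B0N_bounds : ∀ x ∈ B0N, x < 4294967296 := by decide
theorem GoodM_B0N : GoodM B0N := by constructor <;> decide
theorem GoodM_IDN : GoodM IDN := by constructor <;> decide

theorem fB0_lt (w : Nat) : fB0 w < 4294967296 := appRest_lt B0N B0N_bounds 0 w

theorem pw_lt (k w : Nat) (hw : w < 4294967296) : fB0^[k] w < 4294967296 := by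
  induction k with
  | zero => simpa using hw
  | succ k ih => rw [Function.iterate_succ_apply']; exact fB0_lt _

theorem RepM_B0N : RepM B0N 1 := by intro w _; simp [fB0]

theorem GoodM_SQN (M : List Nat) (hM : GoodM M) : GoodM (SQN M) := by
  constructor
  · simp [SQN]
  · intro x hx
    simp [SQN] at hx
    obtain ⟨n, _, rfl⟩ := hx
    exact appRest_lt M hM.2 0 _

theorem GoodM_MULN (M N : List Nat) (hM : GoodM M) (hN : GoodM N) : GoodM (MULN M N) := by
  constructor
  · simp [MULN, hN.1]
  · intro x hx
    simp [MULN] at hx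
    obtain ⟨a, _, rfl⟩ := hx
    exact appRest_lt M hM.2 0 _

theorem RepM_SQN (M : List Nat) (hlen : M.length = 32) (k : Nat) (hM : RepM M k) :
    RepM (SQN M) (2 * k) := by
  intro w hw
  rw [appN_SQN M hlen, hM w hw, hM _ (pw_lt k w hw), ← Function.iterate_add_apply]
  congr 1
  omega

theorem RepM_MULN (M N : List Nat) (a b : Nat) (hM : RepM M a) (hN : RepM N b) :
    RepM (MULN M N) (a + b) := by
  intro w hw
  rw [appN_MULN, hN w hw, hM _ (pw_lt b w hw), ← Function.iterate_add_apply]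

theorem RepM_congr (M : List Nat) (a b : Nat) (h : RepM M a) (hab : a = b) : RepM M b := hab ▸ h

-- identity matrix acts as identity on 32-bit values
theorem xor_disjoint (j : Nat) : ∀ (a c : Nat), a < 2 ^ j → a ^^^ c * 2 ^ j = a + c * 2 ^ j := by
  intro a c ha
  have hrw : a + c * 2 ^ j = 2 ^ j * c + a := by ring
  apply Nat.eq_of_testBit_eq
  intro k
  rw [Nat.testBit_xor, hrw, Nat.testBit_two_pow_mul_add c ha k]
  by_cases hk : k < j
  · have hc : (c * 2 ^ j).testBit k = false := by
      rw [← Nat.shiftLeft_eq, Nat.testBit_shiftLeft]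
      simp
      omega
    simp [hc, hk]
  · have hc : a.testBit k = false :=
      Nat.testBit_lt_two_pow (lt_of_lt_of_le ha (Nat.pow_le_pow_right (by norm_num) (by omega)))
    have hcc : (c * 2 ^ j).testBit k = c.testBit (k - j) := by
      rw [← Nat.shiftLeft_eq, Nat.testBit_shiftLeft]
      simp
      omega
    simp [hc, hcc, hk]

theorem appRest_IDN : ∀ (w i : Nat), w < 2 ^ (32 - i) → i ≤ 32 → appRest IDN i w = w * 2 ^ i := by
  intro w
  induction w using Nat.strong_induction_on with
  | _ w ih =>
    intro i hw hi
    rw [appRest_eq]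
    by_cases h0 : w = 0
    · subst h0; simp [appRest_zero]
    · have hi' : i < 32 := by
        by_contra h
        have : 32 - i = 0 := by omega
        rw [this] at hw; omega
      have hget : IDN.getD i 0 = 2 ^ i := by
        simp [IDN, List.getD_eq_getElem?_getD, hi', Nat.one_shiftLeft]
      have hw2 : w / 2 < 2 ^ (32 - (i+1)) := by
        have : 2 ^ (32 - i) = 2 * 2 ^ (32 - (i+1)) := by
          rw [← pow_succ']
          congr 1
          omega
        omega
      rw [ih (w/2) (by omega) (i+1) hw2 (by omega), hget]
      rcases Nat.mod_two_eq_zero_or_one w with h1 | h1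
      · simp only [h1, Nat.zero_ne_one, if_false, Nat.zero_xor]
        have : w / 2 * 2 ^ (i + 1) = (w / 2 * 2) * 2 ^ i := by ring
        rw [this]
        congr 1
        omega
      · simp only [h1, if_true]
        have h2i : (2 : Nat) ^ i < 2 ^ (i + 1) := by
          exact Nat.pow_lt_pow_right (by norm_num) (by omega)
        rw [xor_disjoint (i+1) _ _ h2i]
        have hd : w = 2 * (w / 2) + 1 := by omega
        calc 2 ^ i + w / 2 * 2 ^ (i + 1) = (2 * (w / 2) + 1) * 2 ^ i := by ring
        _ = w * 2 ^ i := by rw [← hd]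

theorem RepM_IDN : RepM IDN 0 := by
  intro w hw
  have := appRest_IDN w 0 (by norm_num; omega) (by omega)
  simpa [appN] using this

-- bridge: the ported gf2_matrix_times computes the model application
theorem getD_map_cast (M : List Nat) (i : Nat) :
    (M.map (fun x : Nat => (x : Int))).getD i 0 = ((M.getD i 0 : Nat) : Int) := by
  by_cases h : i < M.length
  · rw [List.getD_eq_getElem _ _ (by simpa using h), List.getD_eq_getElem _ _ h]
    exact List.getElem_map ..
  · rw [List.getD_eq_default _ _ (by simpa using by omega), List.getD_eq_default _ _ (by omega)]
    simp

theorem timesAux_spec (M : List Nat) :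
    ∀ (f : Nat) (i w sum : Nat), w < 2 ^ f → w < 4294967296 →
      gf2MatrixTimesAux f (M.map (fun x : Nat => (x : Int))) (sum : Int) i (w : Int)
        = ((sum ^^^ appRest M i w : Nat) : Int) := by
  intro f
  induction f with
  | zero =>
    intro i w sum hwf _
    have : w = 0 := by omega
    subst this
    simp [gf2MatrixTimesAux, appRest_zero]
  | succ f ih =>
    intro i w sum hwf hw32
    by_cases h0 : w = 0
    · subst h0; simp [gf2MatrixTimesAux, appRest_zero]
    · rw [gf2MatrixTimesAux]
      have hne : (w : Int) ≠ 0 := by exact_mod_cast h0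
      rw [if_neg hne]
      have hband : PySem.Int.band (w : Int) 1 = ((w &&& 1 : Nat) : Int) := by
        exact_mod_cast PySem.Int.band_natCast w 1
      have hshift : ((w : Int) >>> (1 : Nat)) = ((w / 2 : Nat) : Int) := by
        rw [Int.shiftRight_eq_div_pow]
        exact_mod_cast (Int.natCast_div ..).symm
      have hmask : PySem.Int.band ((w / 2 : Nat) : Int) 0x7FFFFFFF = ((w / 2 : Nat) : Int) := by
        have : (0x7FFFFFFF : Int) = ((2147483647 : Nat) : Int) := by norm_num
        rw [this, PySem.Int.band_natCast]
        have h31 : (2147483647 : Nat) = 2 ^ 31 - 1 := by norm_num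
        rw [h31, Nat.and_two_pow_sub_one_eq_mod, Nat.mod_eq_of_lt (by omega)]
      rw [hshift, hmask, hband, Nat.and_one_is_mod]
      rw [appRest_eq M i w]
      by_cases hodd : w % 2 = 1
      · rw [if_pos (by exact_mod_cast by omega : ((w % 2 : Nat) : Int) ≠ 0)]
        rw [getD_map_cast]
        have hx : PySem.Int.bxor (sum : Int) ((M.getD i 0 : Nat) : Int)
            = ((sum ^^^ M.getD i 0 : Nat) : Int) := PySem.Int.bxor_natCast _ _
        rw [hx, ih (i+1) (w/2) (sum ^^^ M.getD i 0) (by omega) (by omega)]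
        rw [if_pos hodd]
        congr 1
        rw [Nat.xor_assoc]
      · rw [if_neg (by simp; omega)]
        rw [ih (i+1) (w/2) sum (by omega) (by omega)]
        rw [if_neg hodd]
        simp

theorem times_spec (M : List Nat) (hM : ∀ x ∈ M, x < 4294967296) (v : Int)
    (h1 : -2147483648 ≤ v) (h2 : v < 4294967296) :
    gf2_matrix_times (M.map (fun x : Nat => (x : Int))) v
      = ((appN M (v % 4294967296).toNat : Nat) : Int) := by
  by_cases hv : 0 ≤ v
  · obtain ⟨w, rfl⟩ : ∃ w : Nat, v = (w : Int) := ⟨v.toNat, by omega⟩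
    have hw : w < 4294967296 := by exact_mod_cast h2
    have hemod : (((w : Int)) % 4294967296).toNat = w := by omega
    rw [hemod]
    have h64 : w < 2 ^ 64 := lt_of_lt_of_le hw (by norm_num)
    have hs := timesAux_spec M 64 0 w 0 h64 hw
    simpa [gf2_matrix_times, appN] using hs
  · replace hv : v < 0 := by omega
    set w : Nat := (v % 4294967296).toNat with hwdef
    have hw : (w : Int) = v + 4294967296 := by omega
    have hw32 : w < 4294967296 := by omega
    have hwne : w ≠ 0 := by omega
    show gf2MatrixTimesAux (63+1) _ _ _ _ = _
    rw [gf2MatrixTimesAux]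
    rw [if_neg (by omega : ¬ v = 0)]
    have hcond : PySem.Int.band v 1 = v % 2 := by
      rw [PySem.Int.band_one, PySem.Int.mod_eq_emod_of_pos (by norm_num)]
    have hquot : v >>> (1 : Nat) = v / 2 := by
      rw [Int.shiftRight_eq_div_pow]; norm_num
    have hband : PySem.Int.band (v / 2) 0x7FFFFFFF = ((w / 2 : Nat) : Int) := by
      unfold PySem.Int.band
      rw [if_neg (by omega), if_pos (by norm_num)]
      have hk : (((-(v / 2) - 1 : Int)).toNat : Int) = -(v / 2) - 1 := by omega
      have hklt : (-(v / 2) - 1 : Int).toNat < 2 ^ 31 := by omega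
      have hmask : ((0x7FFFFFFF : Int)).toNat = 2 ^ 31 - 1 := by decide
      rw [hmask, Nat.and_comm, Nat.and_two_pow_sub_one_eq_mod, Nat.mod_eq_of_lt hklt]
      have : (2 : Nat) ^ 31 - 1 - (-(v / 2) - 1 : Int).toNat = w / 2 := by omega
      rw [this]
    have h63 : w / 2 < 2 ^ 63 := by
      have : (4294967296 : Nat) ≤ 2 ^ 63 := by norm_num
      omega
    rcases Nat.mod_two_eq_zero_or_one w with hpar | hpar
    · rw [if_neg (by rw [hcond]; omega)]
      rw [hquot, hband]
      have ht := timesAux_spec M 63 (0+1) (w / 2) 0 h63 (by omega)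
      rw [Nat.cast_zero] at ht
      rw [ht]
      conv_rhs => rw [appN, appRest_eq M 0 w]
      simp [hpar]
    · rw [if_pos (by rw [hcond]; omega)]
      rw [getD_map_cast]
      have hx : PySem.Int.bxor (0 : Int) ((M.getD 0 0 : Nat) : Int)
          = ((0 ^^^ M.getD 0 0 : Nat) : Int) := by
        exact_mod_cast PySem.Int.bxor_natCast 0 (M.getD 0 0)
      rw [hx, hquot, hband]
      have ht := timesAux_spec M 63 (0+1) (w / 2) (0 ^^^ M.getD 0 0) h63 (by omega)
      rw [ht]
      conv_rhs => rw [appN, appRest_eq M 0 w]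
      simp [hpar]

-- bridge: the ported gf2_matrix_square computes the model square
theorem square_foldl_aux (mat sqI : List Int) : ∀ (k : Nat),
    (List.range k).foldl
      (fun sq n =>
        if sq.length < n + 1 then sq ++ [gf2_matrix_times mat (mat.getD n 0)]
        else sq.set n (gf2_matrix_times mat (mat.getD n 0)))
      sqI
    = (List.range k).map (fun n => gf2_matrix_times mat (mat.getD n 0)) ++ sqI.drop k := by
  intro k
  induction k with
  | zero => simp
  | succ k ih =>
    rw [List.range_succ, List.foldl_append, ih]
    simp only [List.foldl_cons, List.foldl_nil]
    by_cases h : sqI.drop k = []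
    · rw [if_pos (by simp [h])]
      have hdrop : sqI.drop (k+1) = [] := by
        rw [← List.tail_drop, h]; rfl
      simp [h, hdrop, List.map_append]
    · obtain ⟨d, ds, hds⟩ : ∃ d ds, sqI.drop k = d :: ds := by
        cases hx : sqI.drop k with
        | nil => exact absurd hx h
        | cons d ds => exact ⟨d, ds, rfl⟩
      rw [hds, if_neg (by simp)]
      rw [List.set_append]
      rw [if_neg (by simp)]
      have hlen : k - ((List.range k).map (fun n => gf2_matrix_times mat (mat.getD n 0))).length = 0 := by
        simp
      rw [hlen]
      have hdrop : sqI.drop (k+1) = ds := by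
        rw [← List.tail_drop, hds]; rfl
      simp [List.map_append, hdrop]

theorem square_foldl (sqI mat : List Int) :
    gf2_matrix_square sqI mat
      = (List.range 32).map (fun n => gf2_matrix_times mat (mat.getD n 0)) ++ sqI.drop 32 :=
  square_foldl_aux mat sqI 32

theorem square_spec (M : List Nat) (hM : ∀ x ∈ M, x < 4294967296) (sqI : List Int)
    (hlen : sqI.length ≤ 32) :
    gf2_matrix_square sqI (M.map (fun x : Nat => (x : Int))) = (SQN M).map (fun x : Nat => (x : Int)) := by
  rw [square_foldl, List.drop_eq_nil_of_le hlen, List.append_nil]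
  unfold SQN
  rw [List.map_map]
  apply List.map_congr_left
  intro n _
  rw [getD_map_cast]
  have hlt := getD_lt M hM n
  have hs := times_spec M hM ((M.getD n 0 : Nat) : Int) (by omega) (by exact_mod_cast hlt)
  rw [hs]
  have : (((M.getD n 0 : Nat) : Int) % 4294967296).toNat = M.getD n 0 := by omega
  rw [this]
  rfl

theorem mul_spec (B R : List Nat) (hB : ∀ x ∈ B, x < 4294967296) (hR : ∀ x ∈ R, x < 4294967296) :
    gf2_matrix_mul (B.map (fun x : Nat => (x : Int))) (R.map (fun x : Nat => (x : Int)))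
      = (MULN B R).map (fun x : Nat => (x : Int)) := by
  unfold gf2_matrix_mul MULN
  rw [List.map_map, List.map_map]
  apply List.map_congr_left
  intro a ha
  have halt := hR a ha
  have hs := times_spec B hB ((a : Nat) : Int) (by omega) (by exact_mod_cast halt)
  simp only [Function.comp_apply]
  rw [hs]
  have : (((a : Nat) : Int) % 4294967296).toNat = a := by omega
  rw [this]

theorem bandCast (l : Nat) : PySem.Int.band (l : Int) 1 = ((l % 2 : Nat) : Int) := by
  have h : (1 : Int) = ((1 : Nat) : Int) := rfl
  rw [h, PySem.Int.band_natCast, Nat.and_one_is_mod]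

theorem shiftCast (l : Nat) : ((l : Int) >>> (1 : Nat)) = ((l / 2 : Nat) : Int) := by
  rw [Int.shiftRight_eq_div_pow]
  exact_mod_cast (Int.natCast_div ..).symm

theorem apply_spec (P : List Nat) (k : Nat) (hP : GoodM P) (hrep : RepM P k)
    (v : Int) (w : Nat) (hv1 : -2147483648 ≤ v) (hv2 : v < 4294967296)
    (hw : (w : Int) = v % 4294967296) :
    gf2_matrix_times (P.map (fun x : Nat => (x : Int))) v = ((fB0^[k] w : Nat) : Int) := by
  have h1 : (v % 4294967296).toNat = w := by omega
  rw [times_spec P hP.2 v hv1 hv2, h1, hrep w (by omega)]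

theorem inv_cast (u : Nat) (hu : u < 4294967296) :
    -2147483648 ≤ ((u : Nat) : Int) ∧ ((u : Nat) : Int) < 4294967296
      ∧ (u : Int) = ((u : Nat) : Int) % 4294967296 := by
  refine ⟨by omega, by omega, by omega⟩

theorem crcLoop_spec :
    ∀ (f : Nat) (E O : List Nat) (o : Nat), GoodM E → GoodM O → RepM O o →
      ∀ (v : Int) (w : Nat), -2147483648 ≤ v → v < 4294967296 → ((w : Int) = v % 4294967296) →
      ∀ (l : Nat), l < 4 ^ f →
      crc32CombineLoop f (E.map (fun x : Nat => (x : Int))) (O.map (fun x : Nat => (x : Int))) v (l : Int)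
        = if l = 0 then v else ((fB0^[2 * o * l] w : Nat) : Int) := by
  intro f
  induction f with
  | zero =>
    intro E O o hE hO hrep v w hv1 hv2 hw l hl
    have : l = 0 := by omega
    subst this
    simp [crc32CombineLoop]
  | succ f ih =>
    intro E O o hE hO hrep v w hv1 hv2 hw l hl
    by_cases hl0 : l = 0
    · subst hl0; simp [crc32CombineLoop]
    · rw [if_neg hl0]
      have hw32 : w < 4294967296 := by omega
      -- one unfolding of the loop body
      rw [crc32CombineLoop]
      rw [if_neg (by exact_mod_cast hl0)]
      -- even = square(even, odd)
      have hsq1 : gf2_matrix_square (E.map (fun x : Nat => (x : Int))) (O.map (fun x : Nat => (x : Int)))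
          = (SQN O).map (fun x : Nat => (x : Int)) :=
        square_spec O hO.2 _ (by rw [List.length_map, hE.1])
      have hE' : GoodM (SQN O) := GoodM_SQN O hO
      have hrepE' : RepM (SQN O) (2 * o) := RepM_SQN O hO.1 o hrep
      simp only [hsq1, bandCast, shiftCast]
      -- first conditional application
      have hpow4 : 4 ^ (f + 1) = 4 * 4 ^ f := by rw [pow_succ]; ring
      set v1 : Int := if ((l % 2 : Nat) : Int) ≠ 0 then gf2_matrix_times ((SQN O).map (fun x : Nat => (x : Int))) v else v with hv1def
      set w1 : Nat := if l % 2 = 1 then fB0^[2 * o] w else w with hw1def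
      have hw1lt : w1 < 4294967296 := by
        rw [hw1def]; split
        · exact pw_lt _ _ hw32
        · exact hw32
      have hinv1 : -2147483648 ≤ v1 ∧ v1 < 4294967296 ∧ (w1 : Int) = v1 % 4294967296 := by
        rw [hv1def, hw1def]
        rcases Nat.mod_two_eq_zero_or_one l with hp | hp
        · rw [if_neg (by simp [hp]), if_neg (by omega)]
          exact ⟨hv1, hv2, hw⟩
        · rw [if_pos (by simp [hp]), if_pos hp]
          rw [apply_spec (SQN O) (2 * o) hE' hrepE' v w hv1 hv2 hw]
          exact inv_cast _ (pw_lt _ _ hw32)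
      obtain ⟨hi1, hi2, hi3⟩ := hinv1
      by_cases hl2 : l / 2 = 0
      · rw [if_pos (by exact_mod_cast congrArg (Nat.cast : Nat → Int) hl2)]
        -- l = 1
        have hl1 : l = 1 := by omega
        subst hl1
        rw [hv1def, if_pos (by norm_num)]
        rw [apply_spec (SQN O) (2 * o) hE' hrepE' v w hv1 hv2 hw]
        norm_num
      · rw [if_neg (by exact_mod_cast hl2)]
        -- second half of the body
        have hsq2 : gf2_matrix_square (O.map (fun x : Nat => (x : Int))) ((SQN O).map (fun x : Nat => (x : Int)))
            = (SQN (SQN O)).map (fun x : Nat => (x : Int)) :=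
          square_spec (SQN O) hE'.2 _ (by rw [List.length_map, hO.1])
        have hO' : GoodM (SQN (SQN O)) := GoodM_SQN _ hE'
        have hrepO' : RepM (SQN (SQN O)) (2 * (2 * o)) := RepM_SQN _ hE'.1 _ hrepE'
        simp only [hsq2]
        set v2 : Int := if ((l / 2 % 2 : Nat) : Int) ≠ 0 then gf2_matrix_times ((SQN (SQN O)).map (fun x : Nat => (x : Int))) v1 else v1 with hv2def
        set w2 : Nat := if l / 2 % 2 = 1 then fB0^[2 * (2 * o)] w1 else w1 with hw2def
        have hw2lt : w2 < 4294967296 := by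
          rw [hw2def]; split
          · exact pw_lt _ _ hw1lt
          · exact hw1lt
        have hinv2 : -2147483648 ≤ v2 ∧ v2 < 4294967296 ∧ (w2 : Int) = v2 % 4294967296 := by
          rw [hv2def, hw2def]
          rcases Nat.mod_two_eq_zero_or_one (l / 2) with hp | hp
          · rw [if_neg (by simp [hp]), if_neg (by omega)]
            exact ⟨hi1, hi2, hi3⟩
          · rw [if_pos (by simp [hp]), if_pos hp]
            rw [apply_spec (SQN (SQN O)) (2 * (2 * o)) hO' hrepO' v1 w1 hi1 hi2 hi3]
            exact inv_cast _ (pw_lt _ _ hw1lt)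
        obtain ⟨hj1, hj2, hj3⟩ := hinv2
        have hrec := ih (SQN O) (SQN (SQN O)) (2 * (2 * o)) hE' hO' hrepO' v2 w2 hj1 hj2 hj3 (l / 2 / 2) (by omega)
        rw [hrec]
        by_cases hq : l / 2 / 2 = 0
        · rw [if_pos hq]
          have hp2 : l / 2 % 2 = 1 := by omega
          have hv2val : v2 = ((fB0^[2 * (2 * o)] w1 : Nat) : Int) := by
            rw [hv2def, if_pos (by simp [hp2]),
              apply_spec (SQN (SQN O)) (2 * (2 * o)) hO' hrepO' v1 w1 hi1 hi2 hi3]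
          rw [hv2val]
          rcases Nat.mod_two_eq_zero_or_one l with hp | hp
          · rw [hw1def, if_neg (by omega)]
            have he : 2 * (2 * o) = 2 * o * l := by
              rw [show l = 2 by omega]; ring
            rw [he]
          · rw [hw1def, if_pos hp, ← Function.iterate_add_apply]
            have he : 2 * (2 * o) + 2 * o = 2 * o * l := by
              rw [show l = 3 by omega]; ring
            rw [he]
        · rw [if_neg hq]
          have hfin : ∀ (a : Nat), w2 = fB0^[a] w →
              2 * (2 * (2 * o)) * (l / 2 / 2) + a = 2 * o * l →
              ((fB0^[2 * (2 * (2 * o)) * (l / 2 / 2)] w2 : Nat) : Int)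
                = ((fB0^[2 * o * l] w : Nat) : Int) := by
            intro a hw2a hsum
            rw [hw2a, ← Function.iterate_add_apply, hsum]
          rcases Nat.mod_two_eq_zero_or_one l with hp | hp <;>
            rcases Nat.mod_two_eq_zero_or_one (l / 2) with hp2 | hp2
          · exact hfin 0 (by rw [hw2def, if_neg (by omega), hw1def, if_neg (by omega)]; simp)
              (by obtain ⟨q, h1, h2⟩ : ∃ q, l / 2 / 2 = q ∧ l = 4 * q := ⟨l / 2 / 2, rfl, by omega⟩; rw [h1, h2]; ring)
          · exact hfin (2 * (2 * o)) (by rw [hw2def, if_pos hp2, hw1def, if_neg (by omega)])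
              (by obtain ⟨q, h1, h2⟩ : ∃ q, l / 2 / 2 = q ∧ l = 4 * q + 2 := ⟨l / 2 / 2, rfl, by omega⟩; rw [h1, h2]; ring)
          · exact hfin (2 * o) (by rw [hw2def, if_neg (by omega), hw1def, if_pos hp])
              (by obtain ⟨q, h1, h2⟩ : ∃ q, l / 2 / 2 = q ∧ l = 4 * q + 1 := ⟨l / 2 / 2, rfl, by omega⟩; rw [h1, h2]; ring)
          · exact hfin (2 * (2 * o) + 2 * o)
              (by rw [hw2def, if_pos hp2, hw1def, if_pos hp, ← Function.iterate_add_apply])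
              (by obtain ⟨q, h1, h2⟩ : ∃ q, l / 2 / 2 = q ∧ l = 4 * q + 3 := ⟨l / 2 / 2, rfl, by omega⟩; rw [h1, h2]; ring)

theorem binLoop_spec :
    ∀ (f : Nat) (R B : List Nat) (r b : Nat), GoodM R → GoodM B → RepM R r → RepM B b →
      ∀ (e : Nat), e < 2 ^ f →
      ∃ R', crc32BinExpLoop f (R.map (fun x : Nat => (x : Int))) (B.map (fun x : Nat => (x : Int))) (e : Int)
              = R'.map (fun x : Nat => (x : Int)) ∧ GoodM R' ∧ RepM R' (r + b * e) := by
  intro f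
  induction f with
  | zero =>
    intro R B r b hR hB hrR hrB e he
    have : e = 0 := by omega
    subst this
    exact ⟨R, by simp [crc32BinExpLoop], hR, by simpa using hrR⟩
  | succ f ih =>
    intro R B r b hR hB hrR hrB e he
    by_cases he0 : e = 0
    · subst he0
      exact ⟨R, by simp [crc32BinExpLoop], hR, by simpa using hrR⟩
    · rw [crc32BinExpLoop]
      rw [if_neg (by exact_mod_cast he0)]
      simp only [bandCast, shiftCast]
      have hmulBB : gf2_matrix_mul (B.map (fun x : Nat => (x : Int))) (B.map (fun x : Nat => (x : Int)))
          = (MULN B B).map (fun x : Nat => (x : Int)) := mul_spec B B hB.2 hB.2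
      have hmulBR : gf2_matrix_mul (B.map (fun x : Nat => (x : Int))) (R.map (fun x : Nat => (x : Int)))
          = (MULN B R).map (fun x : Nat => (x : Int)) := mul_spec B R hB.2 hR.2
      set R1 : List Nat := if e % 2 = 1 then MULN B R else R with hR1def
      have hstep : (if ((e % 2 : Nat) : Int) ≠ 0
            then gf2_matrix_mul (B.map (fun x : Nat => (x : Int))) (R.map (fun x : Nat => (x : Int)))
            else R.map (fun x : Nat => (x : Int)))
          = R1.map (fun x : Nat => (x : Int)) := by
        rw [hR1def]
        rcases Nat.mod_two_eq_zero_or_one e with hp | hp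
        · rw [if_neg (by simp [hp]), if_neg (by omega)]
        · rw [if_pos (by simp [hp]), if_pos hp, hmulBR]
      have hR1 : GoodM R1 := by
        rw [hR1def]; split
        · exact GoodM_MULN B R hB hR
        · exact hR
      have hrR1 : RepM R1 (r + b * (e % 2)) := by
        rw [hR1def]
        rcases Nat.mod_two_eq_zero_or_one e with hp | hp
        · rw [hp, if_neg (by omega)]
          exact RepM_congr R _ _ hrR (by omega)
        · rw [hp, if_pos rfl]
          exact RepM_congr _ _ _ (RepM_MULN B R b r hrB hrR) (by omega)
      rw [hstep, hmulBB]
      obtain ⟨R', hEq, hG, hRep⟩ := ih R1 (MULN B B) (r + b * (e % 2)) (2 * b) hR1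
        (GoodM_MULN B B hB hB)
        hrR1
        (RepM_congr _ _ _ (RepM_MULN B B b b hrB hrB) (by omega))
        (e / 2) (by
          have hpow : 2 ^ (f + 1) = 2 * 2 ^ f := by rw [pow_succ]; ring
          omega)
      refine ⟨R', hEq, hG, RepM_congr _ _ _ hRep ?_⟩
      obtain ⟨q, c, h1, h3, h2⟩ : ∃ q c, e / 2 = q ∧ e % 2 = c ∧ e = 2 * q + c :=
        ⟨e / 2, e % 2, rfl, rfl, by omega⟩
      rw [h1, h3, h2]
      ring

-- ===== VERDICT (by name: the statement is the Claim_ definition above) =====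
theorem crc32_combine_spec : Claim_equal_crc32_combine := by
  intro crc1 crc2 len2 hdom hpre
  unfold Spec_crc32_combine
  replace hpre : 0 ≤ len2 := hpre
  have hdom' : -2147483648 ≤ crc1 ∧ crc1 ≤ 2147483648 ∧ -2147483648 ≤ crc2 ∧ crc2 ≤ 2147483648
      ∧ -2147483648 ≤ len2 ∧ len2 ≤ 2147483648 := by
    simp [Dom_crc32_combine, pvDomInt] at hdom
    omega
  by_cases hz : len2 = 0
  · simp [crc32_combine, crc32_combine_alt, hz]
  · obtain ⟨l, rfl⟩ : ∃ l : Nat, len2 = (l : Int) := ⟨len2.toNat, by omega⟩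
    have hl0 : l ≠ 0 := by exact_mod_cast hz
    have hlB : l ≤ 2147483648 := by exact_mod_cast hdom'.2.2.2.2.2
    unfold crc32_combine crc32_combine_alt
    rw [if_neg hz, if_neg hz]
    dsimp only
    have hodd : ((PySem.List.pyRange 1 32).foldl
        (fun (st : List Int × Int) _n => (st.1 ++ [st.2], st.2 <<< (1 : Nat))) ([0xEDB88320], 1)).1
        = B0N.map (fun x : Nat => (x : Int)) := by decide
    have heven : gf2_matrix_square [] (B0N.map (fun x : Nat => (x : Int)))
        = (SQN B0N).map (fun x : Nat => (x : Int)) :=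
      square_spec B0N B0N_bounds [] (by simp)
    have hE' : GoodM (SQN B0N) := GoodM_SQN B0N GoodM_B0N
    have hodd2 : gf2_matrix_square (B0N.map (fun x : Nat => (x : Int)))
          ((SQN B0N).map (fun x : Nat => (x : Int)))
        = (SQN (SQN B0N)).map (fun x : Nat => (x : Int)) :=
      square_spec (SQN B0N) hE'.2 _ (by rw [List.length_map, GoodM_B0N.1])
    have hO' : GoodM (SQN (SQN B0N)) := GoodM_SQN _ hE'
    have hrepO' : RepM (SQN (SQN B0N)) (2 * (2 * 1)) :=
      RepM_SQN _ hE'.1 _ (RepM_SQN B0N GoodM_B0N.1 1 RepM_B0N)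
    set w : Nat := (crc1 % 4294967296).toNat with hwdef
    have hw : (w : Int) = crc1 % 4294967296 := by omega
    have hl4 : l < 4 ^ 64 := by
      have : (2147483649 : Nat) ≤ 4 ^ 64 := by norm_num
      omega
    have hloop := crcLoop_spec 64 (SQN B0N) (SQN (SQN B0N)) (2 * (2 * 1)) hE' hO' hrepO'
      crc1 w (by omega) (by omega) hw l hl4
    rw [hodd, heven, hodd2, hloop, if_neg hl0]
    -- B side
    have hbase : (0xEDB88320 : Int) :: (List.range 31).map (fun n : Nat => (1 : Int) <<< n)
        = B0N.map (fun x : Nat => (x : Int)) := by decide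
    have hid : (List.range 32).map (fun n : Nat => (1 : Int) <<< n)
        = IDN.map (fun x : Nat => (x : Int)) := by decide
    have hcast8 : (8 * ((l : Nat) : Int)) = ((8 * l : Nat) : Int) := by push_cast; ring
    have h8l : 8 * l < 2 ^ 64 := by
      have : (8 * 2147483648 + 1 : Nat) ≤ 2 ^ 64 := by norm_num
      omega
    obtain ⟨R', hEq, hG, hRep⟩ := binLoop_spec 64 IDN B0N 0 1 GoodM_IDN GoodM_B0N
      RepM_IDN RepM_B0N (8 * l) h8l
    rw [hbase, hid, hcast8, hEq]
    rw [apply_spec R' _ hG hRep crc1 w (by omega) (by omega) hw]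
    exact congrArg (fun a : Nat => PySem.Int.bxor ((fB0^[a] w : Nat) : Int) crc2) (by ring)
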